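-- pv_equiv track=rewrite | github.com/andreiclu/Python_basics | medium_hard_problems/pricey_products.py | pricey_prod
-- ===== SOURCE A (Python) =====
-- def pricey_prod(dict_):
--     sorted_dict = sorted(dict_.items(), key=lambda x:x[1], reverse=True)
--     lst = []
--     for item in sorted_dict:
--         if item[1] < 500:
--             return lst
--         else:
--             lst.append(item[0])
--
--     return lst
-- ===== SOURCE B (Python) =====
-- def pricey_prod(dict_):
--     filtered = [kv for kv in dict_.items() if kv[1] >= 500]
--     filtered.sort(key=lambda x: x[1], reverse=True)
--     return [k for k, _ in filtered]
-- ===== Notes on version B (the rewrite author's own statement) =====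
-- stated objective: simpler
-- what changed: B filters the >=500 pairs first and sorts only those, then maps to keys, replacing A's sort-everything-then-scan-with-early-return loop by a filter/sort/map pipeline.
import Mathlib
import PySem

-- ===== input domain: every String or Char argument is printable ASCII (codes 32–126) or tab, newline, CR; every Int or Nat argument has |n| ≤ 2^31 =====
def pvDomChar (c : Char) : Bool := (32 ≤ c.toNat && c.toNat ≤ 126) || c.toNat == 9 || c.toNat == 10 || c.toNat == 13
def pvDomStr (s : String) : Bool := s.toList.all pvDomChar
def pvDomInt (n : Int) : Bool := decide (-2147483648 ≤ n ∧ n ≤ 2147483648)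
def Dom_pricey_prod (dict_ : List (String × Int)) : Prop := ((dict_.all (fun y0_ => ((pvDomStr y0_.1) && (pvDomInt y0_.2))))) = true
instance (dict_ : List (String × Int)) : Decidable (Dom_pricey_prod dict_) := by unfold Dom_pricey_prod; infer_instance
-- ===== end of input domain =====

-- ===== PORT A =====
-- A: sort all items by value descending (stable), then scan, returning the
-- accumulated keys at the first value < 500.
def priceyLoop (lst : List String) (items : List (String × Int)) : List String :=
  match items with
  | [] => lst
  | item :: rest => if item.2 < 500 then lst else priceyLoop (lst ++ [item.1]) rest

def pricey_prod (dict_ : List (String × Int)) : List String :=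
  priceyLoop [] (PySem.List.sorted dict_ (fun x => x.2) true)

-- ===== PORT B =====
-- B: filter the pairs with value >= 500, sort just those by value descending
-- (stable), return their keys.
def pricey_prod_alt (dict_ : List (String × Int)) : List String :=
  (PySem.List.sorted (dict_.filter (fun kv => 500 ≤ kv.2)) (fun x => x.2) true).map Prod.fst

-- ===== PRECONDITION & SPEC =====
def Spec_pricey_prod (dict_ : List (String × Int)) (out : List String) : Prop := out = pricey_prod_alt dict_
instance (dict_ : List (String × Int)) (out : List String) : Decidable (Spec_pricey_prod dict_ out) := by unfold Spec_pricey_prod; infer_instance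

-- ===== CLAIM (what is proved, stated in full; the proofs are below) =====
def Claim_equal_pricey_prod : Prop := ∀ (dict_ : List (String × Int)), Dom_pricey_prod dict_ → Spec_pricey_prod dict_ (pricey_prod dict_)

-- ===== LEMMAS AND PROOFS =====

-- A's scan-with-early-return is takeWhile (value >= 500) followed by taking keys.
theorem priceyLoop_eq (lst : List String) (items : List (String × Int)) :
    priceyLoop lst items = lst ++ (items.takeWhile (fun x => decide (500 ≤ x.2))).map Prod.fst := by
  induction items generalizing lst with
  | nil => simp [priceyLoop]
  | cons x rest ih =>
    by_cases h : x.2 < 500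
    · have h' : ¬ (500 ≤ x.2) := by omega
      simp [priceyLoop, h, List.takeWhile_cons, h']
    · have h' : (500 : Int) ≤ x.2 := by omega
      simp [priceyLoop, h, ih, List.takeWhile_cons, h']

-- On a list sorted by value descending, takeWhile (>= 500) = filter (>= 500).
theorem takeWhile_eq_filter_of_desc (ys : List (String × Int))
    (h : ys.Pairwise (fun a b => b.2 ≤ a.2)) :
    ys.takeWhile (fun x => decide (500 ≤ x.2)) = ys.filter (fun x => decide (500 ≤ x.2)) := by
  induction ys with
  | nil => rfl
  | cons y ys ih =>
    rcases List.pairwise_cons.mp h with ⟨hy, hys⟩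
    by_cases hk : 500 ≤ y.2
    · simp [List.filter_cons, hk, ih hys]
    · have : ys.filter (fun x => decide (500 ≤ x.2)) = [] := by
        rw [List.filter_eq_nil_iff]
        intro z hz
        have := hy z hz
        simp; omega
      simp [List.takeWhile_cons, hk, this]

-- insertBy (value-descending rule) preserves the descending-pairwise invariant.
theorem insertBy_pairwise (x : String × Int) (acc : List (String × Int))
    (h : acc.Pairwise (fun a b => b.2 ≤ a.2)) :
    (PySem.List.insertBy (fun a b => decide ((b.2 : Int) < a.2)) x acc).Pairwise
      (fun a b => b.2 ≤ a.2) := by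
  induction acc with
  | nil => simp [PySem.List.insertBy]
  | cons y ys ih =>
    rcases List.pairwise_cons.mp h with ⟨hy, hys⟩
    by_cases hb : y.2 < x.2
    · rw [PySem.List.insertBy]
      simp only [hb, decide_true, if_true]
      refine List.pairwise_cons.mpr ⟨?_, h⟩
      intro z hz
      rcases List.mem_cons.mp hz with hz | hz
      · subst hz; omega
      · have := hy z hz; omega
    · rw [PySem.List.insertBy]
      simp only [hb, decide_false]
      refine List.pairwise_cons.mpr ⟨?_, ih hys⟩
      intro z hz
      rcases (PySem.List.mem_insertBy _ _ _ _).mp hz with hz | hz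
      · subst hz; omega
      · exact hy z hz

-- Inserting an element with larger value than everything in l puts it in front.
theorem insertBy_front (x : String × Int) (l : List (String × Int))
    (h : ∀ z ∈ l, z.2 < x.2) :
    PySem.List.insertBy (fun a b => decide ((b.2 : Int) < a.2)) x l = x :: l := by
  cases l with
  | nil => rfl
  | cons y ys =>
    rw [PySem.List.insertBy]
    have : y.2 < x.2 := h y (by simp)
    simp [this]

-- filter commutes with one descending-order insertion (on a descending list).
theorem filter_insertBy (x : String × Int) (acc : List (String × Int))
    (h : acc.Pairwise (fun a b => b.2 ≤ a.2)) :
    (PySem.List.insertBy (fun a b => decide ((b.2 : Int) < a.2)) x acc).filter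
        (fun kv => decide (500 ≤ kv.2)) =
      if 500 ≤ x.2 then
        PySem.List.insertBy (fun a b => decide ((b.2 : Int) < a.2)) x
          (acc.filter (fun kv => decide (500 ≤ kv.2)))
      else acc.filter (fun kv => decide (500 ≤ kv.2)) := by
  induction acc with
  | nil =>
    by_cases hx : 500 ≤ x.2 <;>
      simp [PySem.List.insertBy, hx]
  | cons y ys ih =>
    rcases List.pairwise_cons.mp h with ⟨hy, hys⟩
    by_cases hb : y.2 < x.2
    · rw [PySem.List.insertBy]
      simp only [hb, decide_true, if_true]
      by_cases hx : 500 ≤ x.2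
      · have hfront : ∀ z ∈ (y :: ys).filter (fun kv => decide (500 ≤ kv.2)), z.2 < x.2 := by
          intro z hz
          have hz' := List.mem_of_mem_filter hz
          rcases List.mem_cons.mp hz' with hz' | hz'
          · subst hz'; omega
          · have := hy z hz'; omega
        rw [insertBy_front x _ hfront]
        simp [List.filter_cons, hx]
      · simp [List.filter_cons, hx]
    · rw [PySem.List.insertBy]
      simp only [hb, decide_false, Bool.false_eq_true, if_false]
      by_cases hx : 500 ≤ x.2 <;> by_cases hky : 500 ≤ y.2
      · rw [List.filter_cons, List.filter_cons]
        simp only [hky, decide_true, if_true]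
        rw [ih hys]
        simp only [hx, if_true]
        rw [PySem.List.insertBy]
        simp [hb]
      · rw [List.filter_cons, List.filter_cons]
        simp only [hky, decide_false]
        rw [ih hys]
        simp [hx]
      · rw [List.filter_cons, List.filter_cons]
        simp only [hky, decide_true, if_true]
        rw [ih hys]
        simp [hx]
      · rw [List.filter_cons, List.filter_cons]
        simp only [hky, decide_false]
        rw [ih hys]
        simp [hx]

-- filter commutes with the whole descending insertion-sort fold.
theorem filter_foldl_insertBy (xs acc : List (String × Int))
    (h : acc.Pairwise (fun a b => b.2 ≤ a.2)) :
    (xs.foldl (fun acc x => PySem.List.insertBy (fun a b => decide ((b.2 : Int) < a.2)) x acc) acc).filter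
        (fun kv => decide (500 ≤ kv.2)) =
      (xs.filter (fun kv => decide (500 ≤ kv.2))).foldl
        (fun acc x => PySem.List.insertBy (fun a b => decide ((b.2 : Int) < a.2)) x acc)
        (acc.filter (fun kv => decide (500 ≤ kv.2))) := by
  induction xs generalizing acc with
  | nil => simp
  | cons x xs ih =>
    rw [List.foldl_cons, ih _ (insertBy_pairwise x acc h), filter_insertBy x acc h,
      List.filter_cons]
    by_cases hx : 500 ≤ x.2 <;> simp [hx]

-- filter (>= 500) commutes with the stable descending sort by value.
theorem filter_sorted (xs : List (String × Int)) :
    (PySem.List.sorted xs (fun x => x.2) true).filter (fun kv => decide (500 ≤ kv.2)) =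
      PySem.List.sorted (xs.filter (fun kv => decide (500 ≤ kv.2))) (fun x => x.2) true := by
  rw [PySem.List.sorted_rev_eq_foldl_insertBy, PySem.List.sorted_rev_eq_foldl_insertBy]
  simpa using filter_foldl_insertBy xs [] (by simp)

-- ===== VERDICT (by name: the statement is the Claim_ definition above) =====
theorem pricey_prod_spec : Claim_equal_pricey_prod := by
  intro dict_ _
  show pricey_prod dict_ = pricey_prod_alt dict_
  rw [pricey_prod, pricey_prod_alt, priceyLoop_eq,
    takeWhile_eq_filter_of_desc _ (PySem.List.sorted_pairwise_rev dict_ (fun x => x.2)),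
    filter_sorted]
  simp
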